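-- pv_equiv track=rewrite | github.com/ackaraosman/hatemap | twitter/management/commands/fetch_tweets.py | check_for_badwords
-- ===== SOURCE A (Python) =====
-- def check_for_badwords(text, badwords):
--     words = text.split()
--     for badword in badwords:
--         if any(word.startswith(badword) for word in words):
--             return True
--         if len(badword.split()) > 1:
--             if badword in text:
--                 return True
--     return False
-- ===== SOURCE B (Python) =====
-- def check_for_badwords(text, badwords):
--     maxlen = 0
--     for bw in badwords:
--         maxlen = max(maxlen, len(bw))
--     prefixes = set()
--     for w in text.split():
--         for i in range(min(len(w), maxlen) + 1):
--             prefixes.add(w[:i])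
--     for bw in badwords:
--         if bw in prefixes:
--             return True
--         if len(bw.split()) > 1 and bw in text:
--             return True
--     return False
-- ===== Notes on version B (the rewrite author's own statement) =====
-- stated objective: alternative
-- what changed: B precomputes one hash set of all word prefixes up to the maximum badword length, so each badword is checked by a single set lookup instead of a startswith scan over every word.
import Mathlib
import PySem

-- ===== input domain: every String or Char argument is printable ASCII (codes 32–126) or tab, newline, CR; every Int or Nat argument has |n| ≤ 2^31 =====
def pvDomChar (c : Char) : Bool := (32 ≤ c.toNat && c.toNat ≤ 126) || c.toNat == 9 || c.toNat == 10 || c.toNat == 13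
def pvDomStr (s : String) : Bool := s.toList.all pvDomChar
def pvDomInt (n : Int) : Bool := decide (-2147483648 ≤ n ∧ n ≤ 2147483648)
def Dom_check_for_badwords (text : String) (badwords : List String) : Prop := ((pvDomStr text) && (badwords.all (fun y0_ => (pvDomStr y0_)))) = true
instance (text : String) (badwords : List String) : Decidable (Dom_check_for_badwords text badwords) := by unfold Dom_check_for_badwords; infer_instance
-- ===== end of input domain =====

-- B builds one set of all word prefixes (capped at the maximum badword length), so each badword
-- is checked by a single set lookup instead of a startswith scan over every word.

-- ===== PORT A =====
-- the 'for badword in badwords' loop of A, with early return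
def pvLoopA (words : List String) (text : String) : List String → Bool
  | [] => false
  | bw :: rest =>
    if words.any (fun w => PySem.Str.startswith w bw) then true
    else if (PySem.Str.split₀ bw).length > 1 then
      if PySem.Str.isIn bw text then true
      else pvLoopA words text rest
    else pvLoopA words text rest

def check_for_badwords (text : String) (badwords : List String) : Bool :=
  pvLoopA (PySem.Str.split₀ text) text badwords

-- ===== PORT B =====
-- the two nested loops of Source B building 'prefixes'
def pvPrefixes (maxlen : Int) (words : List String) : PySem.Set String :=
  words.foldl
    (fun s w =>
      (PySem.List.pyRange 0 (min (PySem.Str.len w) maxlen + 1)).foldl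
        (fun s i => PySem.Set.add s (PySem.Str.slice w none (some i))) s)
    PySem.Set.empty

-- the 'for bw in badwords' loop of Source B, with early return
def pvLoopB (prefixes : PySem.Set String) (text : String) : List String → Bool
  | [] => false
  | bw :: rest =>
    if PySem.Set.contains prefixes bw then true
    else if (PySem.Str.split₀ bw).length > 1 && PySem.Str.isIn bw text then true
    else pvLoopB prefixes text rest

def check_for_badwords_alt (text : String) (badwords : List String) : Bool :=
  let maxlen := badwords.foldl (fun m bw => max m (PySem.Str.len bw)) 0
  pvLoopB (pvPrefixes maxlen (PySem.Str.split₀ text)) text badwords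

-- ===== PRECONDITION & SPEC =====
def Spec_check_for_badwords (text : String) (badwords : List String) (out : Bool) : Prop := out = check_for_badwords_alt text badwords
instance (text : String) (badwords : List String) (out : Bool) : Decidable (Spec_check_for_badwords text badwords out) := by unfold Spec_check_for_badwords; infer_instance

-- ===== CLAIM (what is proved, stated in full; the proofs are below) =====
def Claim_equal_check_for_badwords : Prop := ∀ (text : String) (badwords : List String), Dom_check_for_badwords text badwords → Spec_check_for_badwords text badwords (check_for_badwords text badwords)

-- ===== LEMMAS AND PROOFS =====

-- membership in a fold of Set.add over mapped elements
theorem pv_mem_foldl_add {β : Type} (f : β → String) (l : List β) (s : PySem.Set String) (y : String) :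
    y ∈ l.foldl (fun s i => PySem.Set.add s (f i)) s ↔ y ∈ s ∨ ∃ i ∈ l, y = f i := by
  induction l generalizing s with
  | nil => simp
  | cons a t ih =>
    simp only [List.foldl_cons, ih, PySem.Set.mem_add, List.mem_cons]
    constructor
    · rintro ((h | h) | ⟨i, hi, rfl⟩)
      · exact Or.inl h
      · exact Or.inr ⟨a, Or.inl rfl, h⟩
      · exact Or.inr ⟨i, Or.inr hi, rfl⟩
    · rintro (h | ⟨i, (rfl | hi), rfl⟩)
      · exact Or.inl (Or.inl h)
      · exact Or.inl (Or.inr rfl)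
      · exact Or.inr ⟨i, hi, rfl⟩

-- a string enters the prefix structure of word w iff it is a prefix of w of length ≤ maxlen
theorem pv_mem_prefixes_of_word (w y : String) (m : Int) (s : PySem.Set String) :
    y ∈ (PySem.List.pyRange 0 (min (PySem.Str.len w) m + 1)).foldl
        (fun s i => PySem.Set.add s (PySem.Str.slice w none (some i))) s
      ↔ y ∈ s ∨ (y.toList <+: w.toList ∧ (y.toList.length : Int) ≤ m) := by
  rw [pv_mem_foldl_add]
  constructor
  · rintro (h | ⟨i, hi, rfl⟩)
    · exact Or.inl h
    · right
      obtain ⟨h0, hlt⟩ := PySem.List.mem_pyRange_one.mp hi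
      have hsl : (PySem.Str.slice w none (some i)).toList = List.take i.toNat w.toList := by
        rw [PySem.Str.toList_slice, PySem.Chars.slice_eq_listSlice, PySem.List.slice_to _ h0]
      refine ⟨by rw [hsl]; exact List.take_prefix _ _, ?_⟩
      rw [hsl, List.length_take]
      simp only [PySem.Str.len_eq] at hlt
      omega
  · rintro (h | ⟨hp, hlen⟩)
    · exact Or.inl h
    · right
      refine ⟨(y.toList.length : Int), ?_, ?_⟩
      · rw [PySem.List.mem_pyRange_one]
        have hle := hp.length_le
        simp only [PySem.Str.len_eq]
        constructor
        · positivity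
        · omega
      · apply String.toList_injective
        rw [PySem.Str.toList_slice, PySem.Chars.slice_eq_listSlice,
          PySem.List.slice_to _ (by positivity)]
        simp only [Int.toNat_natCast]
        exact (List.prefix_iff_eq_take.mp hp)

theorem pv_contains_iff {α : Type} [BEq α] [LawfulBEq α] (s : PySem.Set α) (x : α) :
    PySem.Set.contains s x = true ↔ x ∈ s := by
  simp [PySem.Set.contains]

theorem pv_mem_pvPrefixes_aux (words : List String) (m : Int) (s : PySem.Set String) (y : String) :
    y ∈ words.foldl (fun s w => (PySem.List.pyRange 0 (min (PySem.Str.len w) m + 1)).foldl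
        (fun s i => PySem.Set.add s (PySem.Str.slice w none (some i))) s) s
      ↔ y ∈ s ∨ ∃ w ∈ words, y.toList <+: w.toList ∧ (y.toList.length : Int) ≤ m := by
  induction words generalizing s with
  | nil => simp
  | cons a t ih =>
    simp only [List.foldl_cons, ih, pv_mem_prefixes_of_word, List.mem_cons]
    constructor
    · rintro ((h | h) | ⟨w, hw, hp⟩)
      · exact Or.inl h
      · exact Or.inr ⟨a, Or.inl rfl, h⟩
      · exact Or.inr ⟨w, Or.inr hw, hp⟩
    · rintro (h | ⟨w, (rfl | hw), hp⟩)
      · exact Or.inl (Or.inl h)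
      · exact Or.inl (Or.inr hp)
      · exact Or.inr ⟨w, hw, hp⟩

theorem pv_contains_prefixes (words : List String) (m : Int) (bw : String)
    (hbw : (bw.toList.length : Int) ≤ m) :
    PySem.Set.contains (pvPrefixes m words) bw = words.any (fun w => PySem.Str.startswith w bw) := by
  rw [Bool.eq_iff_iff, pv_contains_iff, List.any_eq_true]
  unfold pvPrefixes
  rw [pv_mem_pvPrefixes_aux]
  constructor
  · rintro (h | ⟨w, hw, hp, -⟩)
    · exact absurd h (by simp [PySem.Set.empty])
    · refine ⟨w, hw, ?_⟩
      simp only [PySem.Str.startswith_eq]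
      exact (PySem.Chars.startswith_iff _ _).mpr hp
  · rintro ⟨w, hw, hs⟩
    refine Or.inr ⟨w, hw, ?_, hbw⟩
    simp only [PySem.Str.startswith_eq] at hs
    exact (PySem.Chars.startswith_iff _ _).mp hs

theorem pv_loops_eq (words : List String) (text : String) (m : Int) (bws : List String)
    (hm : ∀ bw ∈ bws, (bw.toList.length : Int) ≤ m) :
    pvLoopA words text bws = pvLoopB (pvPrefixes m words) text bws := by
  induction bws with
  | nil => rfl
  | cons bw rest ih =>
    have h1 : (bw.toList.length : Int) ≤ m := hm bw (List.mem_cons_self ..)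
    have ih' := ih (fun b hb => hm b (List.mem_cons_of_mem _ hb))
    simp only [pvLoopA, pvLoopB, pv_contains_prefixes words m bw h1, ih']
    by_cases h2 : 1 < (PySem.Str.split₀ bw).length <;> simp [h2]

-- ===== VERDICT (by name: the statement is the Claim_ definition above) =====
theorem check_for_badwords_spec : Claim_equal_check_for_badwords := by
  intro text badwords _
  unfold Spec_check_for_badwords check_for_badwords check_for_badwords_alt
  refine pv_loops_eq _ _ _ _ ?_
  intro bw hbw
  have h := (PySem.List.le_foldl_max_int badwords (fun b => PySem.Str.len b) 0).2 bw hbw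
  simpa [PySem.Str.len_eq] using h
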